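-- pv_equiv track=rewrite | github.com/Shaun-Fernandes/Assignment-Scheduler | schedule_timetable.py | checkDupCols
-- ===== SOURCE A (Python) =====
-- def checkDupCols(arr):
--     for row in arr:
--         seen = set()
--         for x in row:
--             if x in seen:
--                 return True
--             if x is not None:
--                 seen.add(x)
--     return False
-- ===== SOURCE B (Python) =====
-- def checkDupCols(arr):
--     for row in arr:
--         vals = sorted(x for x in row if x is not None)
--         for a, b in zip(vals, vals[1:]):
--             if a == b:
--                 return True
--     return False
-- ===== Notes on version B (the rewrite author's own statement) =====
-- stated objective: alternative
-- what changed: Replaces the incremental seen-set membership loop with a sort-then-adjacent-scan per row: sort the non-None values and report a duplicate iff two adjacent sorted values are equal.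
import Mathlib
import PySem

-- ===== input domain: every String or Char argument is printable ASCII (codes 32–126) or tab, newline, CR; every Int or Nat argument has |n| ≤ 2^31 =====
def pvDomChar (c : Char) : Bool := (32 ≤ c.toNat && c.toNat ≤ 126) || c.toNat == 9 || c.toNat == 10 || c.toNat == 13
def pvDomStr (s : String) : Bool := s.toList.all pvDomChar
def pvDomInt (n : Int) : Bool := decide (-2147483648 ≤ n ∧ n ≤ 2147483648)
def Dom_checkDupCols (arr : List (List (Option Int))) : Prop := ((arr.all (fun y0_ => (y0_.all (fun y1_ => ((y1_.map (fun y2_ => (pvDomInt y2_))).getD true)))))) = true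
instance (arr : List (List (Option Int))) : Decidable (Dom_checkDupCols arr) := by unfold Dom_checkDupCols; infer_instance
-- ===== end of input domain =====

-- B replaces A's incremental seen-set loop by a per-row sort-then-adjacent-scan (alternative algorithm, same return values).


-- ===== PORT A =====
-- inner 'for x in row' loop: returns true on 'return True', else continues with the updated seen set
def rowLoopA (row : List (Option Int)) (seen : PySem.Set (Option Int)) : Bool :=
  match row with
  | [] => false
  | x :: rest =>
      if PySem.Set.contains seen x then true
      else if x ≠ none then rowLoopA rest (PySem.Set.add seen x)
      else rowLoopA rest seen

def checkDupCols (arr : List (List (Option Int))) : Bool :=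
  match arr with
  | [] => false
  | row :: rest => if rowLoopA row PySem.Set.empty then true else checkDupCols rest

-- ===== PORT B =====
-- the 'for a, b in zip(vals, vals[1:])' scan: true iff some adjacent pair is equal
def adjDup (vals : List Int) : Bool :=
  match vals with
  | a :: b :: rest => if a == b then true else adjDup (b :: rest)
  | _ => false

def checkDupCols_alt (arr : List (List (Option Int))) : Bool :=
  match arr with
  | [] => false
  | row :: rest =>
      let vals := PySem.List.sorted (row.filterMap id) (fun x => x) false
      if adjDup vals then true else checkDupCols_alt rest

-- ===== PRECONDITION & SPEC =====
def Spec_checkDupCols (arr : List (List (Option Int))) (out : Bool) : Prop := out = checkDupCols_alt arr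
instance (arr : List (List (Option Int))) (out : Bool) : Decidable (Spec_checkDupCols arr out) := by unfold Spec_checkDupCols; infer_instance

-- ===== CLAIM =====
def Claim_equal_checkDupCols : Prop := ∀ (arr : List (List (Option Int))), Dom_checkDupCols arr → Spec_checkDupCols arr (checkDupCols arr)

-- ===== LEMMAS AND PROOFS =====

lemma contains_of_mem {α : Type} [BEq α] [LawfulBEq α] (s : List α) (x : α) (hx : x ∈ s) :
    PySem.Set.contains s x = true := by
  unfold PySem.Set.contains; simp [hx]

lemma contains_of_not_mem {α : Type} [BEq α] [LawfulBEq α] (s : List α) (x : α) (hx : x ∉ s) :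
    PySem.Set.contains s x = false := by
  unfold PySem.Set.contains; simp [hx]

-- characterisation of A's inner loop: with seen a nodup set of non-None values,
-- it returns true iff seen together with the row's non-None values has a duplicate
lemma rowLoopA_iff (row : List (Option Int)) (seen : List (Option Int))
    (hs : seen.Nodup) (hn : (none : Option Int) ∉ seen) :
    rowLoopA row seen = true ↔ ¬ (seen ++ (row.filterMap id).map Option.some).Nodup := by
  induction row generalizing seen with
  | nil => simp [rowLoopA, hs]
  | cons x rest ih =>
      cases x with
      | none =>
          have hc : PySem.Set.contains seen (none : Option Int) = false :=
            contains_of_not_mem seen none hn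
          have hfm : (none :: rest).filterMap (id : Option Int → Option Int)
              = rest.filterMap id := by simp
          rw [hfm]
          simp only [rowLoopA, hc, Bool.false_eq_true, if_false, ne_eq,
            not_true_eq_false, if_false]
          exact ih seen hs hn
      | some v =>
          by_cases hmem : (some v) ∈ seen
          · have hc : PySem.Set.contains seen (some v) = true :=
              contains_of_mem seen (some v) hmem
            have hfm : (some v :: rest).filterMap (id : Option Int → Option Int)
                = v :: rest.filterMap id := by simp
            rw [hfm]
            simp only [rowLoopA, hc, if_true, List.map_cons]
            constructor
            · intro _ h
              simp [List.nodup_append] at h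
              exact (h.2.2 (some v) hmem).1 rfl
            · intro _; exact trivial
          · have hc : PySem.Set.contains seen (some v) = false :=
              contains_of_not_mem seen (some v) hmem
            have hadd : PySem.Set.add seen (some v) = seen ++ [some v] := by
              simp [PySem.Set.add, hmem]
            have hs' : (seen ++ [some v]).Nodup := by
              simp [List.nodup_append]
              exact ⟨hs, fun a ha heq => hmem (heq ▸ ha)⟩
            have hn' : (none : Option Int) ∉ seen ++ [some v] := by simp [hn]
            have hfm : (some v :: rest).filterMap (id : Option Int → Option Int)
                = v :: rest.filterMap id := by simp
            rw [hfm]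
            simp only [rowLoopA, hc, Bool.false_eq_true, if_false, ne_eq,
              reduceCtorEq, not_false_eq_true, if_true, hadd, List.map_cons]
            rw [show seen ++ some v :: (rest.filterMap id).map Option.some
                = (seen ++ [some v]) ++ (rest.filterMap id).map Option.some by simp]
            exact ih (seen ++ [some v]) hs' hn'

-- on a ≤-sorted list, some adjacent pair is equal iff the list has a duplicate
lemma adjDup_iff (s : List Int) (hp : s.Pairwise (· ≤ ·)) :
    adjDup s = true ↔ ¬ s.Nodup := by
  induction s with
  | nil => simp [adjDup]
  | cons a t ih =>
      cases t with
      | nil => simp [adjDup]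
      | cons b rest =>
          have hab : a ≤ b := (List.pairwise_cons.mp hp).1 b (by simp)
          have hp' : (b :: rest).Pairwise (· ≤ ·) := (List.pairwise_cons.mp hp).2
          by_cases heq : a = b
          · subst heq
            simp only [adjDup, beq_self_eq_true, if_true, true_iff]
            intro h
            exact (List.nodup_cons.mp h).1 (by simp)
          · have hnotmem : a ∉ b :: rest := by
              intro hmem
              rcases List.mem_cons.mp hmem with h | h
              · exact heq h
              · have hbc : b ≤ a := (List.pairwise_cons.mp hp').1 a h
                exact heq (le_antisymm hab hbc)
            have : adjDup (a :: b :: rest) = adjDup (b :: rest) := by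
              simp [adjDup, heq]
            rw [this, ih hp']
            constructor
            · intro h hnd; exact h (List.nodup_cons.mp hnd).2
            · intro h hnd; exact h (List.nodup_cons.mpr ⟨hnotmem, hnd⟩)

lemma rowB_iff (row : List (Option Int)) :
    adjDup (PySem.List.sorted (row.filterMap id) (fun x => x) false) = true
      ↔ ¬ (row.filterMap id).Nodup := by
  have hperm := PySem.List.sorted_perm (row.filterMap id) (fun x => x) false
  have hp := PySem.List.sorted_pairwise (row.filterMap id) (fun x => x)
  rw [adjDup_iff _ hp]
  exact not_congr hperm.nodup_iff

lemma row_eq (row : List (Option Int)) :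
    rowLoopA row PySem.Set.empty
      = adjDup (PySem.List.sorted (row.filterMap id) (fun x => x) false) := by
  have h1 := rowLoopA_iff row [] (by simp) (by simp)
  have h2 := rowB_iff row
  have hmap : ((row.filterMap id).map Option.some).Nodup ↔ (row.filterMap id).Nodup :=
    List.nodup_map_iff (Option.some_injective Int)
  simp only [List.nil_append] at h1
  rw [show (PySem.Set.empty : PySem.Set (Option Int)) = [] from rfl, Bool.eq_iff_iff, h1, h2]
  exact not_congr hmap

lemma checkDupCols_eq (arr : List (List (Option Int))) :
    checkDupCols arr = checkDupCols_alt arr := by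
  induction arr with
  | nil => rfl
  | cons row rest ih =>
      simp only [checkDupCols, checkDupCols_alt, row_eq, ih]

-- ===== VERDICT =====
theorem checkDupCols_spec : Claim_equal_checkDupCols := by
  intro arr _
  exact checkDupCols_eq arr
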